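-- pv_equiv track=rewrite | github.com/panpanke/MACE_Prediction | MACE_model/util/load_data.py | select_test_num
-- ===== SOURCE A (Python) =====
-- def select_test_num(p_num, n):
--     # n = int(p_num / N_FOLD)
--     num_list = [i for i in range(1, p_num + 1)]
--     list_all = []
--     for i in num_list:
--         i = str(i)
--         i = i.zfill(3)
--         list_all.append(i)
--
--     test_list = list_all[n - 1:n]
--     return test_list
-- ===== SOURCE B (Python) =====
-- def select_test_num(p_num, n):
--     # O(1): format only the selected fold number, replicating Python slice edge
--     # semantics (n == 0 and negative n) without building the whole list.
--     if n == 0: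
--         return []
--     m = n if n > 0 else p_num + n
--     if 1 <= m <= p_num:
--         return [str(m).zfill(3)]
--     return []
-- ===== Notes on version B (the rewrite author's own statement) =====
-- stated objective: faster
-- what changed: Instead of materialising and formatting all p_num fold labels and slicing out one, B computes the selected index arithmetically (handling n==0 and negative n as Python slices do) and formats only that single number.
import Mathlib
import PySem

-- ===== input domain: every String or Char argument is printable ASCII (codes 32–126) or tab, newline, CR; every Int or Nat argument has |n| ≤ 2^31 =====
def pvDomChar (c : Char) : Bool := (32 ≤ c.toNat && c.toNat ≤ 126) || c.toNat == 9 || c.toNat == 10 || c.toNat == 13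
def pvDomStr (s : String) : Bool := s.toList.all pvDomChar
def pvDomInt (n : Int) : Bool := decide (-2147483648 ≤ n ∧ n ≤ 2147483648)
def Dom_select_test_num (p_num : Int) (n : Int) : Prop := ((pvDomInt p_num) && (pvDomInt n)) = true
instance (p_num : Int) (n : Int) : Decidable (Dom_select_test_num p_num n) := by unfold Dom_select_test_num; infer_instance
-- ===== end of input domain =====

-- B replaces A's build-all-labels-then-slice with an O(1) arithmetic selection of the
-- single fold label (same return value; A is total, no side effects).

-- ===== PORT A =====
def select_test_num (p_num : Int) (n : Int) : List String :=
  -- num_list = [i for i in range(1, p_num + 1)]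
  let num_list := PySem.List.pyRange 1 (p_num + 1) 1
  -- for i in num_list: list_all.append(str(i).zfill(3))
  let list_all := num_list.foldl (fun acc i => acc ++ [PySem.Str.zfill (PySem.Int.toStr i) 3]) []
  -- test_list = list_all[n - 1:n]
  PySem.List.slice list_all (some (n - 1)) (some n)

-- ===== PORT B =====
def select_test_num_alt (p_num : Int) (n : Int) : List String :=
  if n = 0 then []
  else
    let m : Int := if 0 < n then n else p_num + n
    if 1 ≤ m ∧ m ≤ p_num then [PySem.Str.zfill (PySem.Int.toStr m) 3] else []

-- ===== PRECONDITION & SPEC =====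
def Spec_select_test_num (p_num : Int) (n : Int) (out : List String) : Prop := out = select_test_num_alt p_num n
instance (p_num : Int) (n : Int) (out : List String) : Decidable (Spec_select_test_num p_num n out) := by unfold Spec_select_test_num; infer_instance

-- ===== CLAIM (what is proved, stated in full; the proofs are below) =====
def Claim_equal_select_test_num : Prop := ∀ (p_num : Int) (n : Int), Dom_select_test_num p_num n → Spec_select_test_num p_num n (select_test_num p_num n)

-- ===== LEMMAS AND PROOFS =====

-- (xs.drop k).take 1 extracts the single element at index k
lemma take_one_drop (xs : List String) (k : Nat) (h : k < xs.length) :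
    (xs.drop k).take 1 = [xs.getD k ""] := by
  rcases e : xs.drop k with _ | ⟨y, ys⟩
  · rw [List.drop_eq_nil_iff] at e; omega
  · have hy : xs[k] = y := by
      have := List.getElem_drop (xs := xs) (i := k) (j := 0) (h := by simp; omega)
      simpa [e] using this.symm
    simp [List.getD, List.getElem?_eq_getElem h, hy]

lemma tk (xs : List String) (a b : Nat) (hb : b ≤ a + 1) :
    (xs.drop a).take (b - a) = if a < b ∧ a < xs.length then [xs.getD a ""] else [] := by
  by_cases h : a < b ∧ a < xs.length
  · rw [if_pos h, show b - a = 1 by omega]; exact take_one_drop xs a h.2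
  · rw [if_neg h]
    by_cases h1 : b ≤ a
    · simp [Nat.sub_eq_zero_of_le h1]
    · have : xs.drop a = [] := List.drop_eq_nil_of_le (by omega)
      simp [this]

-- what a Python slice xs[n-1:n] evaluates to, in B's shape
lemma slice_adj (xs : List String) (n : Int) :
    PySem.List.slice xs (some (n-1)) (some n) =
      (if n = 0 then ([] : List String)
       else
         let m : Int := if 0 < n then n else (xs.length : Int) + n
         if 1 ≤ m ∧ m ≤ (xs.length : Int) then [xs.getD (m-1).toNat ""] else []) := by
  simp only [PySem.List.slice, PySem.List.clampIdx]
  rw [tk xs _ _ (by split_ifs <;> omega)]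
  split_ifs <;> first
    | rfl
    | (exfalso; omega)
    | (congr 2; omega)

-- A's accumulated list is the formatted range
lemma list_all_eq (p_num : Int) :
    (PySem.List.pyRange 1 (p_num + 1) 1).foldl
        (fun acc i => acc ++ [PySem.Str.zfill (PySem.Int.toStr i) 3]) [] =
      (PySem.List.pyRange 1 (p_num + 1) 1).map (fun i => PySem.Str.zfill (PySem.Int.toStr i) 3) := by
  simpa using PySem.List.foldl_append_singleton_eq_map
    (f := fun i => PySem.Str.zfill (PySem.Int.toStr i) 3)
    (l := PySem.List.pyRange 1 (p_num + 1) 1) []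

-- ===== VERDICT (by name: the statement is the Claim_ definition above) =====
theorem select_test_num_spec : Claim_equal_select_test_num := by
  intro p_num n _
  show select_test_num p_num n = select_test_num_alt p_num n
  simp only [select_test_num, select_test_num_alt]
  rw [list_all_eq, slice_adj]
  have hlen : (((PySem.List.pyRange 1 (p_num + 1) 1).map
      (fun i => PySem.Str.zfill (PySem.Int.toStr i) 3)).length : Int) = max p_num 0 := by
    rw [List.length_map, PySem.List.length_pyRange_one]; omega
  by_cases h0 : n = 0
  · simp [h0]
  rw [if_neg h0, if_neg h0]
  by_cases hp : 0 < n
  · -- positive n: same index on both sides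
    rw [if_pos hp, if_pos hp]
    by_cases hin : 1 ≤ n ∧ n ≤ p_num
    · rw [if_pos (by omega : 1 ≤ n ∧ n ≤ (((PySem.List.pyRange 1 (p_num + 1) 1).map
          (fun i => PySem.Str.zfill (PySem.Int.toStr i) 3)).length : Int)), if_pos hin]
      have hk : (n - 1).toNat < ((PySem.List.pyRange 1 (p_num + 1) 1).map
          (fun i => PySem.Str.zfill (PySem.Int.toStr i) 3)).length := by omega
      rw [List.getD_eq_getElem _ _ hk, List.getElem_map, PySem.List.getElem_pyRange_one]
      have : (1 : Int) + ((n - 1).toNat : Int) = n := by omega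
      rw [this]
    · rw [if_neg (by omega), if_neg hin]
  · -- negative n: B uses p_num + n, the list index is length + n
    rw [if_neg hp, if_neg hp]
    by_cases hin : 1 ≤ p_num + n ∧ p_num + n ≤ p_num
    · rw [if_pos (by omega), if_pos hin]
      have hk : ((((PySem.List.pyRange 1 (p_num + 1) 1).map
          (fun i => PySem.Str.zfill (PySem.Int.toStr i) 3)).length : Int) + n - 1).toNat <
          ((PySem.List.pyRange 1 (p_num + 1) 1).map
          (fun i => PySem.Str.zfill (PySem.Int.toStr i) 3)).length := by omega
      rw [List.getD_eq_getElem _ _ hk, List.getElem_map, PySem.List.getElem_pyRange_one]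
      have : (1 : Int) + (((((PySem.List.pyRange 1 (p_num + 1) 1).map
          (fun i => PySem.Str.zfill (PySem.Int.toStr i) 3)).length : Int) + n - 1).toNat : Int)
          = p_num + n := by omega
      rw [this]
    · rw [if_neg (by omega), if_neg hin]
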